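-- pv_equiv track=rewrite | github.com/garysong23/Wagner | audio/mashability_helpers/sequence.py | _all_sequence_mash_index
-- ===== SOURCE A (Python) =====
-- import itertools
--
-- def _all_sequence_mash_index(songs, mash_index):
--   num_of_songs = len(songs)
--   all_perm = itertools.permutations(songs)
--
--   all_seq_mash_index = {}
--   for perm in all_perm:
--     seq_index = 0
--     for i in range(num_of_songs-1):
--       s1, s2 = perm[i], perm[i+1]
--       index = mash_index[(s1, s2)]
--       seq_index += index
--     all_seq_mash_index[perm] = seq_index
--
--   return all_seq_mash_index
-- ===== SOURCE B (Python) =====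
-- def _all_sequence_mash_index(songs, mash_index):
--     # Recursive prefix builder: choose the remaining songs one index at a time,
--     # carrying the running mash sum; no itertools, no per-permutation rescan.
--     all_seq_mash_index = {}
--
--     def build(remaining, prefix, running):
--         if not remaining:
--             all_seq_mash_index[prefix] = running
--             return
--         for i in range(len(remaining)):
--             s = remaining[i]
--             add = mash_index[(prefix[-1], s)] if prefix else 0
--             build(remaining[:i] + remaining[i + 1:], prefix + (s,), running + add)
--
--     build(list(songs), (), 0)
--     return all_seq_mash_index
-- ===== Notes on version B (the rewrite author's own statement) =====
-- stated objective: alternative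
-- what changed: Replaces itertools.permutations plus a per-permutation consecutive-pair rescan by a recursive prefix builder that picks the remaining songs one index at a time and extends the running mash sum as each song is appended.
import Mathlib
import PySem

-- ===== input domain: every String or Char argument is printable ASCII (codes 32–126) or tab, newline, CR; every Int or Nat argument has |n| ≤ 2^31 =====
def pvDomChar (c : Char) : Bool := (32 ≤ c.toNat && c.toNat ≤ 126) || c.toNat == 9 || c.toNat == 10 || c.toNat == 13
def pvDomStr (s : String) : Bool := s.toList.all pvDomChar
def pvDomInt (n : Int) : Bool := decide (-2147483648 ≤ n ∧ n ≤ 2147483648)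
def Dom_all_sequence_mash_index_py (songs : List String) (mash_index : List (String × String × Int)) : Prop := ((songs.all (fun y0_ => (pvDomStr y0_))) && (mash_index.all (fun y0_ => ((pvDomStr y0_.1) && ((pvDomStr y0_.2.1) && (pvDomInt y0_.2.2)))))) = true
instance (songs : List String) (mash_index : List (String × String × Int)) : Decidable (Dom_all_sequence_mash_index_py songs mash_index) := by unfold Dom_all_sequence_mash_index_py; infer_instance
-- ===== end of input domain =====

-- ===== PORT A =====
-- B replaces itertools.permutations plus a per-permutation consecutive-pair rescan by a
-- recursive prefix builder carrying the running mash sum (objective: alternative decomposition).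
-- Shared lookup helper: Python's mash_index[(s1, s2)] on the association list (first match).
-- Python raises KeyError when the pair is absent — exactly those inputs are excluded by
-- Pre_all_sequence_mash_index_py; the port returns 0 there.
def pvMash (mash_index : List (String × String × Int)) (s1 s2 : String) : Int :=
  match mash_index.find? (fun t => t.1 == s1 && t.2.1 == s2) with
  | some t => t.2.2
  | none => 0

def all_sequence_mash_index_py (songs : List String) (mash_index : List (String × String × Int)) : List (List String × Int) :=
  let num_of_songs := songs.length
  let all_perm := PySem.List.permutations songs num_of_songs
  let all_seq_mash_index : PySem.Dict (List String) Int :=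
    all_perm.foldl (fun acc perm =>
      let seq_index :=
        (PySem.List.pyRange 0 ((num_of_songs : Int) - 1) 1).foldl (fun s i =>
          s + pvMash mash_index (PySem.List.pyGetD perm i "") (PySem.List.pyGetD perm (i + 1) "")) 0
      acc.insert perm seq_index) PySem.Dict.empty
  all_seq_mash_index.items

-- ===== PORT B =====
-- transliteration of Source B's recursive `build`: pick each remaining song by index, extend the
-- prefix and the running sum, store the finished prefix in the accumulator dict.
def pvBuild (mash_index : List (String × String × Int)) (remaining prefixT : List String)
    (running : Int) (acc : PySem.Dict (List String) Int) : PySem.Dict (List String) Int :=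
  if _h : remaining = [] then acc.insert prefixT running
  else
    (List.range remaining.length).attach.foldl
      (fun acc (i : { k // k ∈ List.range remaining.length }) =>
        let s := remaining[i.1]!
        let add := if prefixT = [] then 0
                   else pvMash mash_index (PySem.List.pyGetD prefixT (-1) "") s
        pvBuild mash_index (remaining.eraseIdx i.1) (prefixT ++ [s]) (running + add) acc) acc
termination_by remaining.length
decreasing_by
  have hi : i.1 < remaining.length := List.mem_range.mp i.2
  simp only [List.length_eraseIdx, hi, if_true]
  omega

def all_sequence_mash_index_py_alt (songs : List String) (mash_index : List (String × String × Int)) : List (List String × Int) :=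
  (pvBuild mash_index songs [] 0 PySem.Dict.empty).items

-- ===== PRECONDITION & SPEC =====
-- Pre_ excludes exactly the inputs on which Python A raises KeyError: some ordered pair of
-- songs taken from two distinct positions is missing from mash_index.
def Pre_all_sequence_mash_index_py (songs : List String) (mash_index : List (String × String × Int)) : Prop :=
  ∀ i ∈ List.range songs.length, ∀ j ∈ List.range songs.length, i ≠ j →
    (mash_index.find? (fun t => t.1 == songs[i]! && t.2.1 == songs[j]!)).isSome = true
instance (songs : List String) (mash_index : List (String × String × Int)) : Decidable (Pre_all_sequence_mash_index_py songs mash_index) := by unfold Pre_all_sequence_mash_index_py; infer_instance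

def pvWitness_all_sequence_mash_index_py : List String × (List (String × String × Int)) :=
  (["a", "b"], [("a", "b", 1), ("b", "a", 2)])

def Spec_all_sequence_mash_index_py (songs : List String) (mash_index : List (String × String × Int)) (out : List (List String × Int)) : Prop := out = all_sequence_mash_index_py_alt songs mash_index
instance (songs : List String) (mash_index : List (String × String × Int)) (out : List (List String × Int)) : Decidable (Spec_all_sequence_mash_index_py songs mash_index out) := by unfold Spec_all_sequence_mash_index_py; infer_instance

-- ===== CLAIM (what is proved, stated in full; the proofs are below) =====
def Claim_equal_all_sequence_mash_index_py : Prop := ∀ (songs : List String) (mash_index : List (String × String × Int)), Dom_all_sequence_mash_index_py songs mash_index → Pre_all_sequence_mash_index_py songs mash_index → Spec_all_sequence_mash_index_py songs mash_index (all_sequence_mash_index_py songs mash_index)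

-- ===== LEMMAS AND PROOFS =====

-- unfolding equation for PySem.List.permutations at a successor (specialised to String)
theorem pvPermutations_succ (xs : List String) (r : Nat) :
    PySem.List.permutations xs (r + 1) =
      (List.range xs.length).flatMap (fun i =>
        match xs[i]? with
        | none => []
        | some x => (PySem.List.permutations (xs.eraseIdx i) r).map (fun p => x :: p)) := by
  rw [PySem.List.permutations]
  congr 1
  funext i
  cases xs[i]? <;> simp

-- sum of pvMash over the consecutive pairs of a list
def pvChain (mash_index : List (String × String × Int)) : List String → Int
  | [] => 0
  | [_] => 0
  | a :: b :: t => pvMash mash_index a b + pvChain mash_index (b :: t)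

-- cost added by the suffix p after the prefix pre (0 link if pre is empty)
def pvExt (mash_index : List (String × String × Int)) (pre p : List String) : Int :=
  match pre.getLast? with
  | none => pvChain mash_index p
  | some l => pvChain mash_index (l :: p)

theorem pvExt_nil (mash_index : List (String × String × Int)) (pre : List String) :
    pvExt mash_index pre [] = 0 := by
  unfold pvExt
  cases h : pre.getLast? <;> simp [pvChain]

theorem pvExt_cons (mash_index : List (String × String × Int)) (pre : List String) (s : String)
    (p : List String) :
    pvExt mash_index pre (s :: p) =
      (if h : pre = [] then 0 else pvMash mash_index (pre.getLast h) s) +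
        pvExt mash_index (pre ++ [s]) p := by
  by_cases h : pre = []
  · subst h
    simp only [pvExt, List.getLast?_nil, List.nil_append, List.getLast?_singleton, dif_pos]
    cases p <;> simp [pvChain]
  · have h1 : pre.getLast? = some (pre.getLast h) := List.getLast?_eq_some_getLast h
    simp only [pvExt, h1, List.getLast?_concat, dif_neg h]
    cases p <;> simp [pvChain]

-- B's invariant: pvBuild folds an insert over itertools' permutation list
theorem pvBuild_char (mash_index : List (String × String × Int)) :
    ∀ (n : Nat) (rem : List String), rem.length = n →
      ∀ (pre : List String) (run : Int) (acc : PySem.Dict (List String) Int),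
        pvBuild mash_index rem pre run acc =
          (PySem.List.permutations rem n).foldl
            (fun a p => a.insert (pre ++ p) (run + pvExt mash_index pre p)) acc := by
  intro n
  induction n with
  | zero =>
    intro rem hlen pre run acc
    have hrem : rem = [] := List.eq_nil_of_length_eq_zero hlen
    subst hrem
    rw [pvBuild, PySem.List.permutations_zero]
    simp [pvExt_nil]
  | succ n ih =>
    intro rem hlen pre run acc
    have hne : rem ≠ [] := by
      intro h; rw [h] at hlen; simp at hlen
    rw [pvBuild, dif_neg hne, pvPermutations_succ, List.foldl_flatMap,
      List.foldl_attach (f := fun (acc : PySem.Dict (List String) Int) (k : Nat) =>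
        pvBuild mash_index (rem.eraseIdx k) (pre ++ [rem[k]!])
          (run + if pre = [] then 0
                 else pvMash mash_index (PySem.List.pyGetD pre (-1) "") rem[k]!) acc)]
    refine PySem.List.foldl_congr_mem _ _ _ _ ?_
    intro a i hi
    have hilt : i < rem.length := List.mem_range.mp hi
    have hget : rem[i]? = some rem[i] := List.getElem?_eq_getElem hilt
    have hbang : rem[i]! = rem[i] := getElem!_pos rem i hilt
    have hlen' : (rem.eraseIdx i).length = n := by
      simp [List.length_eraseIdx, hilt]; omega
    simp only [hget, hbang, List.foldl_map, ih (rem.eraseIdx i) hlen']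
    refine PySem.List.foldl_congr_mem _ _ _ _ ?_
    intro b p _
    have hadd :
        (if pre = [] then (0 : Int)
          else pvMash mash_index (PySem.List.pyGetD pre (-1) "") rem[i]) =
        (if h : pre = [] then 0 else pvMash mash_index (pre.getLast h) rem[i]) := by
      by_cases h : pre = []
      · simp [h]
      · simp [h, PySem.List.pyGetD_neg_one pre "" h]
    show b.insert ((pre ++ [rem[i]]) ++ p)
        ((run + if pre = [] then (0 : Int)
                else pvMash mash_index (PySem.List.pyGetD pre (-1) "") rem[i]) +
          pvExt mash_index (pre ++ [rem[i]]) p) =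
      b.insert (pre ++ rem[i] :: p) (run + pvExt mash_index pre (rem[i] :: p))
    rw [hadd, pvExt_cons, ← List.append_cons]
    congr 1
    ring

-- the zip-fold form of the chain sum
theorem pvZip_chain (mash_index : List (String × String × Int)) :
    ∀ (p : List String) (c : Int),
      (p.zip p.tail).foldl (fun s q => s + pvMash mash_index q.1 q.2) c =
        c + pvChain mash_index p := by
  intro p
  induction p with
  | nil => intro c; simp [pvChain]
  | cons a t ih =>
    intro c
    cases t with
    | nil => simp [pvChain]
    | cons b u =>
      have hz : (a :: b :: u).zip ((a :: b :: u).tail) =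
          (a, b) :: ((b :: u).zip ((b :: u).tail)) := by simp
      rw [hz, List.foldl_cons, ih]
      simp [pvChain]; ring

-- A's inner range loop computes the chain sum
theorem pvScore_eq_chain (mash_index : List (String × String × Int)) (p : List String) :
    (PySem.List.pyRange 0 ((p.length : Int) - 1) 1).foldl (fun s i =>
        s + pvMash mash_index (PySem.List.pyGetD p i "") (PySem.List.pyGetD p (i + 1) "")) 0 =
      pvChain mash_index p := by
  cases hp : p with
  | nil =>
    rw [PySem.List.pyRange_one_eq_nil (by norm_num)]
    simp [pvChain]
  | cons x xs =>
    rw [← hp]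
    have hne : p ≠ [] := by rw [hp]; simp
    have hlenpos : 1 ≤ p.length := by rw [hp]; simp
    have hz : (p.zip p.tail).length = p.length - 1 := by
      simp [List.length_zip, List.length_tail]
    have hbound : (p.length : Int) - 1 = ((p.zip p.tail).length : Int) := by
      rw [hz, Nat.cast_sub hlenpos]; norm_num
    rw [hbound]
    rw [PySem.List.foldl_congr_mem _ _
      (fun s i => s + pvMash mash_index (PySem.List.pyGetD (p.zip p.tail) i ("", "")).1
        (PySem.List.pyGetD (p.zip p.tail) i ("", "")).2) _ ?_]
    · rw [PySem.List.foldl_pyRange_zero_pyGetD' (p.zip p.tail) ("", "")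
        (fun s q => s + pvMash mash_index q.1 q.2) 0]
      rw [pvZip_chain]; ring
    · intro acc i hi
      obtain ⟨h0, h1⟩ := PySem.List.mem_pyRange_one.mp hi
      have hiN : i.toNat < (p.zip p.tail).length := by omega
      show acc + pvMash mash_index (PySem.List.pyGetD p i "") (PySem.List.pyGetD p (i + 1) "") =
        acc + pvMash mash_index (PySem.List.pyGetD (p.zip p.tail) i ("", "")).1
          (PySem.List.pyGetD (p.zip p.tail) i ("", "")).2
      have hiP : (i : Int) < (p.length : Int) := by omega
      have hiP1 : i + 1 < (p.length : Int) := by omega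
      rw [PySem.List.pyGetD_eq_getElem (p.zip p.tail) ("", "") h0 (by omega)]
      rw [PySem.List.pyGetD_eq_getElem p "" h0 hiP]
      rw [PySem.List.pyGetD_eq_getElem p "" (by omega) hiP1]
      have h1toNat : (i + 1).toNat = i.toNat + 1 := by omega
      simp only [h1toNat, List.getElem_zip, List.getElem_tail]

-- ===== VERDICT (by name: the statement is the Claim_ definition above) =====
theorem all_sequence_mash_index_py_spec : Claim_equal_all_sequence_mash_index_py := by
  intro songs mash_index _ _
  unfold Spec_all_sequence_mash_index_py
  rw [show all_sequence_mash_index_py songs mash_index =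
      ((PySem.List.permutations songs songs.length).foldl (fun acc perm =>
        acc.insert perm
          ((PySem.List.pyRange 0 ((songs.length : Int) - 1) 1).foldl (fun s i =>
            s + pvMash mash_index (PySem.List.pyGetD perm i "")
              (PySem.List.pyGetD perm (i + 1) "")) 0)) PySem.Dict.empty).items from rfl]
  rw [show all_sequence_mash_index_py_alt songs mash_index =
      (pvBuild mash_index songs [] 0 PySem.Dict.empty).items from rfl]
  rw [pvBuild_char mash_index songs.length songs rfl [] 0 PySem.Dict.empty]
  congr 1
  refine PySem.List.foldl_congr_mem _ _ _ _ ?_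
  intro acc p hp
  have hlen : p.length = songs.length := PySem.List.length_of_mem_permutations hp
  rw [← hlen, pvScore_eq_chain]
  simp [pvExt]
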